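-- pv_equiv track=rewrite | github.com/nednoodlehead/punge_beta | punge_main.py | character_replacer_vevo
-- ===== SOURCE A (Python) =====
-- def character_replacer_vevo(phrase):
--     if 'VEVO' in phrase:
--         first_letter_check = True
--         mainpart_fixed2 = phrase[:-4]
--         mainpart_fixed = ''
--         for letter in mainpart_fixed2:
--             if letter.isupper() is True and first_letter_check is False:
--                 mainpart_fixed = mainpart_fixed + " " + letter
--             else:
--                 mainpart_fixed = mainpart_fixed + letter
--                 first_letter_check = False
--         return mainpart_fixed
--     else:
--         mainpart_fixed = phrase
--         return mainpart_fixed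
-- ===== SOURCE B (Python) =====
-- def character_replacer_vevo(phrase):
--     if 'VEVO' not in phrase:
--         return phrase
--     main = phrase[:-4]
--     breaks = [i for i in range(1, len(main)) if main[i].isupper()]
--     pieces = []
--     prev = 0
--     for b in breaks:
--         pieces.append(main[prev:b])
--         prev = b
--     pieces.append(main[prev:])
--     return ' '.join(pieces)
-- ===== Notes on version B (the rewrite author's own statement) =====
-- stated objective: alternative
-- what changed: A threads a first-letter flag through one char-by-char loop that concatenates onto the result string; B instead first collects the uppercase boundary indices with one pass over range(1, len(main)), then slices main at those boundaries and joins the pieces with single spaces.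
import Mathlib
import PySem

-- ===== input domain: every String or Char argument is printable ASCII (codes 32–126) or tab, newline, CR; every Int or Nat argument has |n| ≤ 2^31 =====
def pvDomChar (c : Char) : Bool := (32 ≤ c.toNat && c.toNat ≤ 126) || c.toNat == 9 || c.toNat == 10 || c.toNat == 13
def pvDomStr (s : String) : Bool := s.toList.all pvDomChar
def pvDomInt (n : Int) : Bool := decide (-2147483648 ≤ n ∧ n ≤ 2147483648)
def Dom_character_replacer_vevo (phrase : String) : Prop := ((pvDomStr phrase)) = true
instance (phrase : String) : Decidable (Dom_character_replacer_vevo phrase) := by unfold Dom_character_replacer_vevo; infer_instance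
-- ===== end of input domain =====

-- B reformulates A's stateful flag-and-concatenate loop as two passes: collect the
-- uppercase boundary indices, then slice-and-join the pieces (objective: alternative).


-- ===== PORT A =====
-- the body of A's for-loop: state = (mainpart_fixed, first_letter_check)
def pvStepA (st : List Char × Bool) (letter : Char) : List Char × Bool :=
  if PySem.Chars.isupper letter = true && st.2 = false then
    (st.1 ++ [' ', letter], st.2)
  else
    (st.1 ++ [letter], false)

def character_replacer_vevo (phrase : String) : String :=
  if PySem.Str.isIn "VEVO" phrase then
    let mainpart_fixed2 := PySem.List.slice phrase.toList none (some (-4))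
    let st := mainpart_fixed2.foldl pvStepA ([], true)
    String.ofList st.1
  else
    phrase

-- ===== PORT B =====
-- the body of B's for-loop over breaks: state = (pieces, prev)
def pvStepB (main : List Char) (st : List (List Char) × Int) (b : Int) : List (List Char) × Int :=
  (st.1 ++ [PySem.List.slice main (some st.2) (some b)], b)

def character_replacer_vevo_alt (phrase : String) : String :=
  if PySem.Str.isIn "VEVO" phrase then
    let main := PySem.List.slice phrase.toList none (some (-4))
    let breaks := (PySem.List.pyRange 1 (main.length : Int) 1).filter
      (fun i => PySem.Chars.isupper (PySem.List.pyGetD main i ' '))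
    let st := breaks.foldl (pvStepB main) ([], 0)
    let pieces := st.1 ++ [PySem.List.slice main (some st.2) none]
    String.ofList (PySem.Chars.join [' '] pieces)
  else
    phrase

-- ===== PRECONDITION & SPEC =====
def Spec_character_replacer_vevo (phrase : String) (out : String) : Prop := out = character_replacer_vevo_alt phrase
instance (phrase : String) (out : String) : Decidable (Spec_character_replacer_vevo phrase out) := by unfold Spec_character_replacer_vevo; infer_instance

-- ===== CLAIM (what is proved, stated in full; the proofs are below) =====
def Claim_equal_character_replacer_vevo : Prop := ∀ (phrase : String), Dom_character_replacer_vevo phrase → Spec_character_replacer_vevo phrase (character_replacer_vevo phrase)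

-- ===== LEMMAS AND PROOFS =====

-- helpers used only by the proofs
def pvG (cs : List Char) : List Char :=
  cs.flatMap (fun c => if PySem.Chars.isupper c then [' ', c] else [c])

def pvSpec : List Char → List Char
  | [] => []
  | c :: cs => c :: pvG cs

def pvP (main : List Char) : Int → List Int → List (List Char)
  | _, [] => []
  | prev, b :: bs => PySem.List.slice main (some prev) (some b) :: pvP main b bs

def pvL : Int → List Int → Int
  | prev, [] => prev
  | _, b :: bs => pvL b bs

def pvJ (main : List Char) : Int → List Int → List Char
  | prev, [] => PySem.List.slice main (some prev) none
  | prev, b :: bs => PySem.List.slice main (some prev) (some b) ++ ' ' :: pvJ main b bs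

theorem pvG_nil : pvG [] = [] := rfl

theorem pvG_cons (c : Char) (cs : List Char) :
    pvG (c :: cs) = (if PySem.Chars.isupper c then [' ', c] else [c]) ++ pvG cs := rfl

-- A's loop after the first character: the flag is false and stays false
theorem pvA_loop_false (cs : List Char) (acc : List Char) :
    cs.foldl pvStepA (acc, false) = (acc ++ pvG cs, false) := by
  induction cs generalizing acc with
  | nil => simp [pvG_nil]
  | cons c cs ih =>
    rw [List.foldl_cons]
    by_cases h : PySem.Chars.isupper c
    · rw [show pvStepA (acc, false) c = (acc ++ [' ', c], false) by simp [pvStepA, h]]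
      rw [ih, pvG_cons, if_pos h]
      simp
    · rw [show pvStepA (acc, false) c = (acc ++ [c], false) by simp [pvStepA, h]]
      rw [ih, pvG_cons, if_neg h]
      simp

theorem pvA_loop (l : List Char) :
    (l.foldl pvStepA ([], true)).1 = pvSpec l := by
  cases l with
  | nil => rfl
  | cons c cs =>
    rw [List.foldl_cons]
    rw [show pvStepA ([], true) c = ([c], false) by simp [pvStepA]]
    rw [pvA_loop_false]
    rfl

-- B's fold collects slices: characterisation by pvP / pvL
theorem pvB_fold (main : List Char) (bs : List Int) (acc : List (List Char)) (prev : Int) :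
    bs.foldl (pvStepB main) (acc, prev) = (acc ++ pvP main prev bs, pvL prev bs) := by
  induction bs generalizing acc prev with
  | nil => simp [pvP, pvL]
  | cons b bs ih => simp [List.foldl_cons, pvStepB, ih, pvP, pvL]

theorem pvJoin_P (main : List Char) (bs : List Int) (prev : Int) :
    PySem.Chars.join [' '] (pvP main prev bs ++ [PySem.List.slice main (some (pvL prev bs)) none])
      = pvJ main prev bs := by
  induction bs generalizing prev with
  | nil => simp [pvP, pvL, pvJ, PySem.Chars.join_singleton]
  | cons b bs ih =>
    rw [pvP, pvL, pvJ, ← ih b]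
    rcases hx : pvP main b bs ++ [PySem.List.slice main (some (pvL b bs)) none] with _ | ⟨y, ys⟩
    · exact absurd hx (List.append_ne_nil_of_right_ne_nil _ (by simp))
    · rw [List.cons_append, hx, PySem.Chars.join_cons_cons]
      simp

-- slice with Nat-cast endpoints, one step to the right
theorem pvSlice_snoc (main : List Char) (prev q : Nat) (hpq : prev ≤ q + 1)
    (hq : q + 1 < main.length) :
    PySem.List.slice main (some (prev : Int)) (some ((q + 2 : Nat) : Int))
      = PySem.List.slice main (some (prev : Int)) (some ((q + 1 : Nat) : Int)) ++ [main[q + 1]] := by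
  rw [PySem.List.slice_natCast, PySem.List.slice_natCast]
  have h1 : q + 2 - prev = (q + 1 - prev) + 1 := by omega
  rw [h1, List.take_add_one]
  congr 1
  rw [List.getElem?_drop]
  have h2 : prev + (q + 1 - prev) = q + 1 := by omega
  rw [h2, List.getElem?_eq_getElem hq]
  rfl

-- the key invariant of B's second pass
theorem pvB_key (main : List Char) (k : Nat) : ∀ (q prev : Nat), prev ≤ q + 1 →
    main.length - (q + 1) = k →
    pvJ main (prev : Int)
      ((PySem.List.pyRange ((q + 1 : Nat) : Int) (main.length : Int) 1).filter
        (fun i => PySem.Chars.isupper (PySem.List.pyGetD main i ' ')))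
      = PySem.List.slice main (some (prev : Int)) (some ((q + 1 : Nat) : Int))
        ++ pvG (main.drop (q + 1)) := by
  induction k with
  | zero =>
    intro q prev hpq hk
    have hge : (main.length : Int) ≤ ((q + 1 : Nat) : Int) := by exact_mod_cast (by omega : main.length ≤ q + 1)
    rw [PySem.List.pyRange_one_eq_nil hge, List.filter_nil, pvJ,
      PySem.List.slice_from_natCast, PySem.List.slice_natCast,
      List.drop_eq_nil_of_le (by omega : main.length ≤ q + 1), pvG_nil,
      List.append_nil, List.take_of_length_le (by simp; omega)]
  | succ k ih =>
    intro q prev hpq hk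
    have hq : q + 1 < main.length := by omega
    have hlt : ((q + 1 : Nat) : Int) < (main.length : Int) := by exact_mod_cast hq
    rw [PySem.List.pyRange_one_cons hlt]
    have hcast : ((q + 1 : Nat) : Int) + 1 = ((q + 2 : Nat) : Int) := by push_cast; ring
    rw [hcast, List.filter_cons]
    have hget : PySem.List.pyGetD main ((q + 1 : Nat) : Int) ' ' = main[q + 1] := by
      rw [PySem.List.pyGetD_natCast, List.getD_eq_getElem?_getD, List.getElem?_eq_getElem hq]
      rfl
    have hdrop : main.drop (q + 1) = main[q + 1] :: main.drop (q + 2) := by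
      rw [List.drop_eq_getElem_cons hq]
    by_cases hup : PySem.Chars.isupper main[q + 1]
    · rw [if_pos (by simp only [hget]; exact hup), pvJ,
        ih (q + 1) (q + 1) (by omega) (by omega), hdrop, pvG_cons, if_pos hup]
      have hslice : PySem.List.slice main (some ((q + 1 : Nat) : Int)) (some ((q + 2 : Nat) : Int))
          = [main[q + 1]] := by
        rw [pvSlice_snoc main (q + 1) q (le_refl _) hq, PySem.List.slice_natCast]
        simp
      rw [hslice]
      simp
    · rw [if_neg (by simp only [hget]; simp [hup]), ih (q + 1) prev (by omega) (by omega),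
        pvSlice_snoc main prev q hpq hq, hdrop, pvG_cons, if_neg hup]
      simp

-- B's whole upper branch computes pvSpec
theorem pvB_main (main : List Char) :
    PySem.Chars.join [' ']
      ((((PySem.List.pyRange 1 (main.length : Int) 1).filter
          (fun i => PySem.Chars.isupper (PySem.List.pyGetD main i ' '))).foldl
        (pvStepB main) ([], 0)).1
       ++ [PySem.List.slice main
            (some (((PySem.List.pyRange 1 (main.length : Int) 1).filter
              (fun i => PySem.Chars.isupper (PySem.List.pyGetD main i ' '))).foldl
              (pvStepB main) ([], 0)).2) none])
      = pvSpec main := by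
  rw [pvB_fold]
  simp only [List.nil_append]
  rw [pvJoin_P]
  cases main with
  | nil =>
    simp [pvJ, pvSpec, PySem.List.pyRange_one_eq_nil, PySem.List.slice_from]
  | cons c cs =>
    have h1 : ((1 : Nat) : Int) = (1 : Int) := rfl
    have h0 : ((0 : Nat) : Int) = (0 : Int) := rfl
    have := pvB_key (c :: cs) ((c :: cs).length - 1) 0 0 (by omega) (by simp)
    rw [h1, h0] at this
    rw [this]
    simp [pysem, pvSpec]

-- ===== VERDICT (by name: the statement is the Claim_ definition above) =====
theorem character_replacer_vevo_spec : Claim_equal_character_replacer_vevo := by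
  intro phrase _
  unfold Spec_character_replacer_vevo character_replacer_vevo character_replacer_vevo_alt
  by_cases h : PySem.Str.isIn "VEVO" phrase
  · rw [if_pos h, if_pos h]
    dsimp only []
    rw [pvA_loop, ← pvB_main]
  · rw [if_neg h, if_neg h]
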